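-- pv_equiv track=rewrite | github.com/lhirdman/obstack | observastack-app/bff/app/auth/dependencies.py | _check_role_permissions
-- ===== SOURCE A (Python) =====
-- from typing import Optional, List, Callable, Any
--
-- def _check_role_permissions(roles: List[str], resource: str, action: str) -> bool:
--     """
--     Check if any of the user's roles allow the specified resource/action.
--
--     This implements a basic RBAC model. In production, this would likely
--     be replaced with a more sophisticated permission system.
--     """
--     # Define role-based permissions
--     role_permissions = {
--         "admin": ["*:*"],  # Admin can do everything
--         "user": [
--             "logs:read", "metrics:read", "traces:read", "alerts:read",
--             "search:read", "insights:read", "profile:read", "profile:write"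
--         ],
--         "viewer": [
--             "logs:read", "metrics:read", "traces:read", "alerts:read",
--             "search:read", "insights:read", "profile:read"
--         ],
--         "editor": [
--             "logs:read", "metrics:read", "traces:read",
--             "alerts:read", "alerts:write", "alerts:acknowledge",
--             "search:read", "insights:read", "profile:read", "profile:write"
--         ],
--         "analyst": [
--             "logs:read", "metrics:read", "traces:read", "alerts:read",
--             "search:read", "search:advanced", "insights:read", "insights:write",
--             "profile:read", "profile:write"
--         ]
--     }
--
--     # Check each role
--     for role in roles:
--         permissions = role_permissions.get(role, [])
--
--         # Check for wildcard permission
--         if "*:*" in permissions: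
--             return True
--
--         # Check for exact match
--         permission = f"{resource}:{action}"
--         if permission in permissions:
--             return True
--
--         # Check for resource wildcard
--         resource_wildcard = f"{resource}:*"
--         if resource_wildcard in permissions:
--             return True
--
--     return False
-- ===== SOURCE B (Python) =====
-- # Inverted index: permission string -> tuple of roles granting it; one lookup
-- # keyed by the requested permission, then scan the user's roles for admin or a granter.
-- _PERM_GRANTERS = {
--     "logs:read": ("user", "viewer", "editor", "analyst"),
--     "metrics:read": ("user", "viewer", "editor", "analyst"),
--     "traces:read": ("user", "viewer", "editor", "analyst"),
--     "alerts:read": ("user", "viewer", "editor", "analyst"),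
--     "alerts:write": ("editor",),
--     "alerts:acknowledge": ("editor",),
--     "search:read": ("user", "viewer", "editor", "analyst"),
--     "search:advanced": ("analyst",),
--     "insights:read": ("user", "viewer", "editor", "analyst"),
--     "insights:write": ("analyst",),
--     "profile:read": ("user", "viewer", "editor", "analyst"),
--     "profile:write": ("user", "editor", "analyst"),
-- }
--
-- def _check_role_permissions(roles, resource, action):
--     """A role allows resource:action iff it is 'admin' (wildcard) or the inverted
--     index lists it as a granter of that exact permission; no resource-wildcard
--     check is needed since no non-admin role holds any ':*' permission."""
--     granters = _PERM_GRANTERS.get(f"{resource}:{action}", ())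
--     return any(r == "admin" or r in granters for r in roles)
-- ===== Notes on version B (the rewrite author's own statement) =====
-- stated objective: faster
-- what changed: Inverts the fixed table into a permission -> granting-roles index looked up once per call by the requested permission string, then scans the roles for 'admin' or a granter, instead of A's per-role forward lookup with three membership scans and two string builds per role.
import Mathlib
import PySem

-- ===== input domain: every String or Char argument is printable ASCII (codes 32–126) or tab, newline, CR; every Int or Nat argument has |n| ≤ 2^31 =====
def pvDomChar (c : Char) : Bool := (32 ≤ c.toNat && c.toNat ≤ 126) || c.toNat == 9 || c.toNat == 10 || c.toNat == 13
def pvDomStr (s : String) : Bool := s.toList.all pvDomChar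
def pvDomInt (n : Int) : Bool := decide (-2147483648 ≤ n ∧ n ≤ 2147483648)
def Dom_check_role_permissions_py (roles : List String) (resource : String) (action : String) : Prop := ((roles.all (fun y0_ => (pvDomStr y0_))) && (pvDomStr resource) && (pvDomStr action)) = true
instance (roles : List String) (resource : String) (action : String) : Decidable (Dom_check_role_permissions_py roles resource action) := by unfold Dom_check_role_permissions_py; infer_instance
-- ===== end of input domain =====

-- B inverts the fixed table into a permission -> granting-roles index, does one lookup keyed
-- by the requested permission and scans the roles for 'admin' or a granter (alternative algorithm; same return value).

-- ===== PORT A =====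
-- the module's fixed role -> permission-list table (A's dict literal)
def rolePermissionsTable : PySem.Dict String (List String) :=
  PySem.Dict.ofList [
    ("admin", ["*:*"]),
    ("user", ["logs:read", "metrics:read", "traces:read", "alerts:read",
              "search:read", "insights:read", "profile:read", "profile:write"]),
    ("viewer", ["logs:read", "metrics:read", "traces:read", "alerts:read",
                "search:read", "insights:read", "profile:read"]),
    ("editor", ["logs:read", "metrics:read", "traces:read",
                "alerts:read", "alerts:write", "alerts:acknowledge",
                "search:read", "insights:read", "profile:read", "profile:write"]),
    ("analyst", ["logs:read", "metrics:read", "traces:read", "alerts:read",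
                 "search:read", "search:advanced", "insights:read", "insights:write",
                 "profile:read", "profile:write"])]

-- A's 'for role in roles' loop with its three early returns
def checkRolesLoopA (resource action : String) : List String → Bool
  | [] => false
  | role :: rest =>
    let permissions := PySem.Dict.getD rolePermissionsTable role []
    if permissions.contains "*:*" then true
    else if permissions.contains (resource ++ ":" ++ action) then true
    else if permissions.contains (resource ++ ":*") then true
    else checkRolesLoopA resource action rest

def check_role_permissions_py (roles : List String) (resource : String) (action : String) : Bool :=
  checkRolesLoopA resource action roles

-- ===== PORT B =====
-- B's inverted index: permission string -> roles granting it (B's dict literal)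
def permGranters : PySem.Dict String (List String) :=
  PySem.Dict.ofList [
    ("logs:read", ["user", "viewer", "editor", "analyst"]),
    ("metrics:read", ["user", "viewer", "editor", "analyst"]),
    ("traces:read", ["user", "viewer", "editor", "analyst"]),
    ("alerts:read", ["user", "viewer", "editor", "analyst"]),
    ("alerts:write", ["editor"]),
    ("alerts:acknowledge", ["editor"]),
    ("search:read", ["user", "viewer", "editor", "analyst"]),
    ("search:advanced", ["analyst"]),
    ("insights:read", ["user", "viewer", "editor", "analyst"]),
    ("insights:write", ["analyst"]),
    ("profile:read", ["user", "viewer", "editor", "analyst"]),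
    ("profile:write", ["user", "editor", "analyst"])]

def check_role_permissions_py_alt (roles : List String) (resource : String) (action : String) : Bool :=
  let granters := PySem.Dict.getD permGranters (resource ++ ":" ++ action) []
  roles.any (fun r => r == "admin" || granters.contains r)

-- ===== PRECONDITION & SPEC =====
def Spec_check_role_permissions_py (roles : List String) (resource : String) (action : String) (out : Bool) : Prop := out = check_role_permissions_py_alt roles resource action
instance (roles : List String) (resource : String) (action : String) (out : Bool) : Decidable (Spec_check_role_permissions_py roles resource action out) := by unfold Spec_check_role_permissions_py; infer_instance

-- ===== CLAIM (what is proved, stated in full; the proofs are below) =====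
def Claim_equal_check_role_permissions_py : Prop := ∀ (roles : List String) (resource : String) (action : String), Dom_check_role_permissions_py roles resource action → Spec_check_role_permissions_py roles resource action (check_role_permissions_py roles resource action)

-- ===== LEMMAS AND PROOFS =====

-- a string of the form s ++ ":*" is never a member of a list of strings none of which ends in '*'
theorem star_not_mem (s : String) (l : List String)
    (h : ∀ t ∈ l, t.toList.getLast? ≠ some '*') : l.contains (s ++ ":*") = false := by
  have hm : (s ++ ":*") ∉ l := fun hm => h _ hm (by simp [String.toList_append])
  simpa using hm

-- permission membership for 'user' matches the inverted index
theorem granters_user (perm : String) :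
    (["logs:read", "metrics:read", "traces:read", "alerts:read", "search:read", "insights:read", "profile:read", "profile:write"]).contains perm
      = (PySem.Dict.getD permGranters perm []).contains "user" := by
  by_cases h : perm ∈ (["logs:read", "metrics:read", "traces:read", "alerts:read", "alerts:write", "alerts:acknowledge", "search:read", "search:advanced", "insights:read", "insights:write", "profile:read", "profile:write"] : List String)
  · fin_cases h <;> decide
  · simp only [List.mem_cons, List.not_mem_nil, not_or, or_false] at h
    obtain ⟨h1, h2, h3, h4, h5, h6, h7, h8, h9, h10, h11, h12⟩ := h
    have hg : PySem.Dict.getD permGranters perm [] = [] := by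
      show PySem.Dict.getD (PySem.Dict.mk [
    ("logs:read", ["user", "viewer", "editor", "analyst"]),
    ("metrics:read", ["user", "viewer", "editor", "analyst"]),
    ("traces:read", ["user", "viewer", "editor", "analyst"]),
    ("alerts:read", ["user", "viewer", "editor", "analyst"]),
    ("alerts:write", ["editor"]),
    ("alerts:acknowledge", ["editor"]),
    ("search:read", ["user", "viewer", "editor", "analyst"]),
    ("search:advanced", ["analyst"]),
    ("insights:read", ["user", "viewer", "editor", "analyst"]),
    ("insights:write", ["analyst"]),
    ("profile:read", ["user", "viewer", "editor", "analyst"]),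
    ("profile:write", ["user", "editor", "analyst"])]) perm [] = []
      simp [PySem.Dict.getD_eq_get?_getD, PySem.Dict.get?, Ne.symm h1, Ne.symm h2, Ne.symm h3, Ne.symm h4, Ne.symm h5, Ne.symm h6, Ne.symm h7, Ne.symm h8, Ne.symm h9, Ne.symm h10, Ne.symm h11, Ne.symm h12]
    have hl : perm ∉ (["logs:read", "metrics:read", "traces:read", "alerts:read", "search:read", "insights:read", "profile:read", "profile:write"] : List String) := by
      intro hm; fin_cases hm <;> simp_all
    simp [hg, hl]

-- permission membership for 'viewer' matches the inverted index
theorem granters_viewer (perm : String) :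
    (["logs:read", "metrics:read", "traces:read", "alerts:read", "search:read", "insights:read", "profile:read"]).contains perm
      = (PySem.Dict.getD permGranters perm []).contains "viewer" := by
  by_cases h : perm ∈ (["logs:read", "metrics:read", "traces:read", "alerts:read", "alerts:write", "alerts:acknowledge", "search:read", "search:advanced", "insights:read", "insights:write", "profile:read", "profile:write"] : List String)
  · fin_cases h <;> decide
  · simp only [List.mem_cons, List.not_mem_nil, not_or, or_false] at h
    obtain ⟨h1, h2, h3, h4, h5, h6, h7, h8, h9, h10, h11, h12⟩ := h
    have hg : PySem.Dict.getD permGranters perm [] = [] := by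
      show PySem.Dict.getD (PySem.Dict.mk [
    ("logs:read", ["user", "viewer", "editor", "analyst"]),
    ("metrics:read", ["user", "viewer", "editor", "analyst"]),
    ("traces:read", ["user", "viewer", "editor", "analyst"]),
    ("alerts:read", ["user", "viewer", "editor", "analyst"]),
    ("alerts:write", ["editor"]),
    ("alerts:acknowledge", ["editor"]),
    ("search:read", ["user", "viewer", "editor", "analyst"]),
    ("search:advanced", ["analyst"]),
    ("insights:read", ["user", "viewer", "editor", "analyst"]),
    ("insights:write", ["analyst"]),
    ("profile:read", ["user", "viewer", "editor", "analyst"]),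
    ("profile:write", ["user", "editor", "analyst"])]) perm [] = []
      simp [PySem.Dict.getD_eq_get?_getD, PySem.Dict.get?, Ne.symm h1, Ne.symm h2, Ne.symm h3, Ne.symm h4, Ne.symm h5, Ne.symm h6, Ne.symm h7, Ne.symm h8, Ne.symm h9, Ne.symm h10, Ne.symm h11, Ne.symm h12]
    have hl : perm ∉ (["logs:read", "metrics:read", "traces:read", "alerts:read", "search:read", "insights:read", "profile:read"] : List String) := by
      intro hm; fin_cases hm <;> simp_all
    simp [hg, hl]

-- permission membership for 'editor' matches the inverted index
theorem granters_editor (perm : String) :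
    (["logs:read", "metrics:read", "traces:read", "alerts:read", "alerts:write", "alerts:acknowledge", "search:read", "insights:read", "profile:read", "profile:write"]).contains perm
      = (PySem.Dict.getD permGranters perm []).contains "editor" := by
  by_cases h : perm ∈ (["logs:read", "metrics:read", "traces:read", "alerts:read", "alerts:write", "alerts:acknowledge", "search:read", "search:advanced", "insights:read", "insights:write", "profile:read", "profile:write"] : List String)
  · fin_cases h <;> decide
  · simp only [List.mem_cons, List.not_mem_nil, not_or, or_false] at h
    obtain ⟨h1, h2, h3, h4, h5, h6, h7, h8, h9, h10, h11, h12⟩ := h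
    have hg : PySem.Dict.getD permGranters perm [] = [] := by
      show PySem.Dict.getD (PySem.Dict.mk [
    ("logs:read", ["user", "viewer", "editor", "analyst"]),
    ("metrics:read", ["user", "viewer", "editor", "analyst"]),
    ("traces:read", ["user", "viewer", "editor", "analyst"]),
    ("alerts:read", ["user", "viewer", "editor", "analyst"]),
    ("alerts:write", ["editor"]),
    ("alerts:acknowledge", ["editor"]),
    ("search:read", ["user", "viewer", "editor", "analyst"]),
    ("search:advanced", ["analyst"]),
    ("insights:read", ["user", "viewer", "editor", "analyst"]),
    ("insights:write", ["analyst"]),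
    ("profile:read", ["user", "viewer", "editor", "analyst"]),
    ("profile:write", ["user", "editor", "analyst"])]) perm [] = []
      simp [PySem.Dict.getD_eq_get?_getD, PySem.Dict.get?, Ne.symm h1, Ne.symm h2, Ne.symm h3, Ne.symm h4, Ne.symm h5, Ne.symm h6, Ne.symm h7, Ne.symm h8, Ne.symm h9, Ne.symm h10, Ne.symm h11, Ne.symm h12]
    have hl : perm ∉ (["logs:read", "metrics:read", "traces:read", "alerts:read", "alerts:write", "alerts:acknowledge", "search:read", "insights:read", "profile:read", "profile:write"] : List String) := by
      intro hm; fin_cases hm <;> simp_all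
    simp [hg, hl]

-- permission membership for 'analyst' matches the inverted index
theorem granters_analyst (perm : String) :
    (["logs:read", "metrics:read", "traces:read", "alerts:read", "search:read", "search:advanced", "insights:read", "insights:write", "profile:read", "profile:write"]).contains perm
      = (PySem.Dict.getD permGranters perm []).contains "analyst" := by
  by_cases h : perm ∈ (["logs:read", "metrics:read", "traces:read", "alerts:read", "alerts:write", "alerts:acknowledge", "search:read", "search:advanced", "insights:read", "insights:write", "profile:read", "profile:write"] : List String)
  · fin_cases h <;> decide
  · simp only [List.mem_cons, List.not_mem_nil, not_or, or_false] at h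
    obtain ⟨h1, h2, h3, h4, h5, h6, h7, h8, h9, h10, h11, h12⟩ := h
    have hg : PySem.Dict.getD permGranters perm [] = [] := by
      show PySem.Dict.getD (PySem.Dict.mk [
    ("logs:read", ["user", "viewer", "editor", "analyst"]),
    ("metrics:read", ["user", "viewer", "editor", "analyst"]),
    ("traces:read", ["user", "viewer", "editor", "analyst"]),
    ("alerts:read", ["user", "viewer", "editor", "analyst"]),
    ("alerts:write", ["editor"]),
    ("alerts:acknowledge", ["editor"]),
    ("search:read", ["user", "viewer", "editor", "analyst"]),
    ("search:advanced", ["analyst"]),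
    ("insights:read", ["user", "viewer", "editor", "analyst"]),
    ("insights:write", ["analyst"]),
    ("profile:read", ["user", "viewer", "editor", "analyst"]),
    ("profile:write", ["user", "editor", "analyst"])]) perm [] = []
      simp [PySem.Dict.getD_eq_get?_getD, PySem.Dict.get?, Ne.symm h1, Ne.symm h2, Ne.symm h3, Ne.symm h4, Ne.symm h5, Ne.symm h6, Ne.symm h7, Ne.symm h8, Ne.symm h9, Ne.symm h10, Ne.symm h11, Ne.symm h12]
    have hl : perm ∉ (["logs:read", "metrics:read", "traces:read", "alerts:read", "search:read", "search:advanced", "insights:read", "insights:write", "profile:read", "profile:write"] : List String) := by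
      intro hm; fin_cases hm <;> simp_all
    simp [hg, hl]

-- a role outside the table grants nothing in the inverted index either
theorem granters_unknown (perm r : String) (h1 : r ≠ "user") (h2 : r ≠ "viewer")
    (h3 : r ≠ "editor") (h4 : r ≠ "analyst") :
    (PySem.Dict.getD permGranters perm []).contains r = false := by
  by_cases h : perm ∈ (["logs:read", "metrics:read", "traces:read", "alerts:read", "alerts:write", "alerts:acknowledge", "search:read", "search:advanced", "insights:read", "insights:write", "profile:read", "profile:write"] : List String)
  have e1 : (permGranters.get? "logs:read").getD ([] : List String) = ["user", "viewer", "editor", "analyst"] := by decide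
  have e2 : (permGranters.get? "metrics:read").getD ([] : List String) = ["user", "viewer", "editor", "analyst"] := by decide
  have e3 : (permGranters.get? "traces:read").getD ([] : List String) = ["user", "viewer", "editor", "analyst"] := by decide
  have e4 : (permGranters.get? "alerts:read").getD ([] : List String) = ["user", "viewer", "editor", "analyst"] := by decide
  have e5 : (permGranters.get? "alerts:write").getD ([] : List String) = ["editor"] := by decide
  have e6 : (permGranters.get? "alerts:acknowledge").getD ([] : List String) = ["editor"] := by decide
  have e7 : (permGranters.get? "search:read").getD ([] : List String) = ["user", "viewer", "editor", "analyst"] := by decide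
  have e8 : (permGranters.get? "search:advanced").getD ([] : List String) = ["analyst"] := by decide
  have e9 : (permGranters.get? "insights:read").getD ([] : List String) = ["user", "viewer", "editor", "analyst"] := by decide
  have e10 : (permGranters.get? "insights:write").getD ([] : List String) = ["analyst"] := by decide
  have e11 : (permGranters.get? "profile:read").getD ([] : List String) = ["user", "viewer", "editor", "analyst"] := by decide
  have e12 : (permGranters.get? "profile:write").getD ([] : List String) = ["user", "editor", "analyst"] := by decide
  · fin_cases h <;> simp [PySem.Dict.getD_eq_get?_getD, e1, e2, e3, e4, e5, e6, e7, e8, e9, e10, e11, e12, h1, h2, h3, h4]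
  · simp only [List.mem_cons, List.not_mem_nil, not_or, or_false] at h
    obtain ⟨g1, g2, g3, g4, g5, g6, g7, g8, g9, g10, g11, g12⟩ := h
    have hg : PySem.Dict.getD permGranters perm [] = [] := by
      show PySem.Dict.getD (PySem.Dict.mk [
    ("logs:read", ["user", "viewer", "editor", "analyst"]),
    ("metrics:read", ["user", "viewer", "editor", "analyst"]),
    ("traces:read", ["user", "viewer", "editor", "analyst"]),
    ("alerts:read", ["user", "viewer", "editor", "analyst"]),
    ("alerts:write", ["editor"]),
    ("alerts:acknowledge", ["editor"]),
    ("search:read", ["user", "viewer", "editor", "analyst"]),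
    ("search:advanced", ["analyst"]),
    ("insights:read", ["user", "viewer", "editor", "analyst"]),
    ("insights:write", ["analyst"]),
    ("profile:read", ["user", "viewer", "editor", "analyst"]),
    ("profile:write", ["user", "editor", "analyst"])]) perm [] = []
      simp [PySem.Dict.getD_eq_get?_getD, PySem.Dict.get?, Ne.symm g1, Ne.symm g2, Ne.symm g3, Ne.symm g4, Ne.symm g5, Ne.symm g6, Ne.symm g7, Ne.symm g8, Ne.symm g9, Ne.symm g10, Ne.symm g11, Ne.symm g12]
    simp [hg]

-- the per-role condition of A's loop equals B's per-role test
theorem per_role (resource action r : String) :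
    ((PySem.Dict.getD rolePermissionsTable r []).contains "*:*"
      || (PySem.Dict.getD rolePermissionsTable r []).contains (resource ++ ":" ++ action)
      || (PySem.Dict.getD rolePermissionsTable r []).contains (resource ++ ":*"))
      = (r == "admin" || (PySem.Dict.getD permGranters (resource ++ ":" ++ action) []).contains r) := by
  by_cases ha : r = "admin"
  · subst ha
    have hp : PySem.Dict.getD rolePermissionsTable "admin" [] = ["*:*"] := by decide
    simp [hp]
  by_cases hu : r = "user"
  · subst hu
    have hp : PySem.Dict.getD rolePermissionsTable "user" [] = ["logs:read", "metrics:read", "traces:read", "alerts:read", "search:read", "insights:read", "profile:read", "profile:write"] := by decide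
    rw [hp, star_not_mem resource _ (by decide), granters_user (resource ++ ":" ++ action)]
    simp
  by_cases hv : r = "viewer"
  · subst hv
    have hp : PySem.Dict.getD rolePermissionsTable "viewer" [] = ["logs:read", "metrics:read", "traces:read", "alerts:read", "search:read", "insights:read", "profile:read"] := by decide
    rw [hp, star_not_mem resource _ (by decide), granters_viewer (resource ++ ":" ++ action)]
    simp
  by_cases he : r = "editor"
  · subst he
    have hp : PySem.Dict.getD rolePermissionsTable "editor" [] = ["logs:read", "metrics:read", "traces:read", "alerts:read", "alerts:write", "alerts:acknowledge", "search:read", "insights:read", "profile:read", "profile:write"] := by decide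
    rw [hp, star_not_mem resource _ (by decide), granters_editor (resource ++ ":" ++ action)]
    simp
  by_cases hn : r = "analyst"
  · subst hn
    have hp : PySem.Dict.getD rolePermissionsTable "analyst" [] = ["logs:read", "metrics:read", "traces:read", "alerts:read", "search:read", "search:advanced", "insights:read", "insights:write", "profile:read", "profile:write"] := by decide
    rw [hp, star_not_mem resource _ (by decide), granters_analyst (resource ++ ":" ++ action)]
    simp
  · have hp : PySem.Dict.getD rolePermissionsTable r [] = [] := by
      show PySem.Dict.getD (PySem.Dict.mk [
    ("admin", ["*:*"]),
    ("user", ["logs:read", "metrics:read", "traces:read", "alerts:read",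
              "search:read", "insights:read", "profile:read", "profile:write"]),
    ("viewer", ["logs:read", "metrics:read", "traces:read", "alerts:read",
                "search:read", "insights:read", "profile:read"]),
    ("editor", ["logs:read", "metrics:read", "traces:read",
                "alerts:read", "alerts:write", "alerts:acknowledge",
                "search:read", "insights:read", "profile:read", "profile:write"]),
    ("analyst", ["logs:read", "metrics:read", "traces:read", "alerts:read",
                 "search:read", "search:advanced", "insights:read", "insights:write",
                 "profile:read", "profile:write"])]) r [] = []
      simp [PySem.Dict.getD_eq_get?_getD, PySem.Dict.get?,
        Ne.symm ha, Ne.symm hu, Ne.symm hv, Ne.symm he, Ne.symm hn]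
    rw [hp, granters_unknown (resource ++ ":" ++ action) r hu hv he hn]
    simp [ha]


-- A's loop equals B's scan of the roles
theorem loop_eq (resource action : String) (roles : List String) :
    checkRolesLoopA resource action roles
      = roles.any (fun r => r == "admin" || (PySem.Dict.getD permGranters (resource ++ ":" ++ action) []).contains r) := by
  induction roles with
  | nil => simp [checkRolesLoopA]
  | cons role rest ih =>
    rw [List.any_cons, ← per_role resource action role, ← ih]
    simp only [checkRolesLoopA]
    split_ifs with h1 h2 h3 <;> simp_all

-- ===== VERDICT (by name: the statement is the Claim_ definition above) =====
theorem check_role_permissions_py_spec : Claim_equal_check_role_permissions_py := by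
  intro roles resource action _
  unfold Spec_check_role_permissions_py check_role_permissions_py check_role_permissions_py_alt
  exact loop_eq resource action roles
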